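-- pv_equiv track=rewrite | github.com/gabrielsimoes/ski-combinator-parser | expr.py | _parse_primary
-- ===== SOURCE A (Python) =====
-- def _parse_primary(w, i):
--     o = ""
--     while i < len(w) and w[i] not in " )":
--         o += w[i]
--         i += 1
--
--     if not o:
--         raise ValueError(f"Unexpected empty object at position {i}.")
--
--     return o, i
-- ===== SOURCE B (Python) =====
-- def _parse_primary(w, i):
--     tail = w[i:]
--     k = next((k for k, c in enumerate(tail) if c in " )"), len(tail))
--     if k == 0:
--         raise ValueError(f"Unexpected empty object at position {i + k}.")
--     return tail[:k], i + k
-- ===== Notes on version B (the rewrite author's own statement) =====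
-- stated objective: faster
-- what changed: B slices the remainder w[i:], locates the first stop character (' ' or ')') with a single generator/next scan, and returns one slice tail[:k] plus i+k, instead of A's character-by-character while loop with += string accumulation (quadratic rebuilds) and manual index stepping.
-- outside the precondition, e.g. on _parse_primary('ab', -1): A returns ('bab', 2), B returns ('b', 0)
import Mathlib
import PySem

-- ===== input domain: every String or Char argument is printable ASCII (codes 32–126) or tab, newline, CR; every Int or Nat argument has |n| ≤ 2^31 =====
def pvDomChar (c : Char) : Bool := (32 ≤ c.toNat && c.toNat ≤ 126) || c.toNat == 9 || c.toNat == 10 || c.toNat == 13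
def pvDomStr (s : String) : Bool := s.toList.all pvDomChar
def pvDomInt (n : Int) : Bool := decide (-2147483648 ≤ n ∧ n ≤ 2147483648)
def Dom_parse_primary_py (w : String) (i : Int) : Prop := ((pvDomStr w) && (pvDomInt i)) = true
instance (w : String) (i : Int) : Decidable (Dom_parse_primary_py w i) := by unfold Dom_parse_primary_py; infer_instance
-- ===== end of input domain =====

-- B replaces A's char-by-char accumulation loop by one slice w[i:], a single scan for the
-- first stop character, and one slice tail[:k] (objective: idiomatic); equal on Pre_ below.

-- ===== PORT A =====
-- A's while loop: 'while i < len(w) and w[i] not in " )": o += w[i]; i += 1'.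
-- The accumulated string o is carried as List Char (o += c is o ++ [c]); pyGet? = none covers
-- both the normal exit i ≥ len(w) and the IndexError path i < -len(w) (outside Pre_).
def parse_primary_py_go (cs : List Char) (o : List Char) (i : Int) : List Char × Int :=
  match h : PySem.List.pyGet? cs i with
  | none => (o, i)
  | some c =>
      if c = ' ' ∨ c = ')' then (o, i)
      else parse_primary_py_go cs (o ++ [c]) (i + 1)
termination_by ((cs.length : Int) - i).toNat
decreasing_by
  have hin : PySem.Raise.InRange cs.length i := by
    by_contra hn
    rw [← PySem.List.pyGet?_eq_none_iff (xs := cs)] at hn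
    simp [hn] at h
  unfold PySem.Raise.InRange at hin
  omega

def parse_primary_py (w : String) (i : Int) : String × Int :=
  let r := parse_primary_py_go w.toList [] i
  -- 'if not o: raise ValueError(...)' — the raise path is excluded by Pre_; the port returns the pair as built
  (String.ofList r.1, r.2)

-- ===== PORT B =====
-- Source B: tail = w[i:]; k = next((k for k,c in enumerate(tail) if c in " )"), len(tail));
-- raise if k == 0 (excluded by Pre_); return tail[:k], i + k.
-- 'next' over enumerate with default len(tail) is List.findIdx (which returns length when no hit).
def parse_primary_py_alt (w : String) (i : Int) : String × Int :=
  let tail := PySem.List.slice w.toList (some i) none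
  let k := tail.findIdx (fun c => c = ' ' || c = ')')
  (String.ofList (tail.take k), i + (k : Int))

-- ===== PRECONDITION & SPEC =====
-- Pre_ restricts i to the natural cursor domain 0 ≤ i (on negative i, A's w[i] wraps from the
-- end of the string — an accident of Python indexing, outside the parser's natural domain —
-- and below -len(w) it raises IndexError) and excludes the inputs where A raises ValueError
-- (i ≥ len(w), or w[i] in " )", i.e. the token at i is empty).
def Pre_parse_primary_py (w : String) (i : Int) : Prop :=
  0 ≤ i ∧ i.toNat < w.toList.length ∧
    w.toList.getD i.toNat ' ' ≠ ' ' ∧ w.toList.getD i.toNat ' ' ≠ ')'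
instance (w : String) (i : Int) : Decidable (Pre_parse_primary_py w i) := by
  unfold Pre_parse_primary_py; infer_instance

def pvWitness_parse_primary_py : String × Int := ("S(K a)", 2)

def Spec_parse_primary_py (w : String) (i : Int) (out : String × Int) : Prop := out = parse_primary_py_alt w i
instance (w : String) (i : Int) (out : String × Int) : Decidable (Spec_parse_primary_py w i out) := by unfold Spec_parse_primary_py; infer_instance

-- ===== CLAIM (what is proved, stated in full; the proofs are below) =====
def Claim_equal_parse_primary_py : Prop := ∀ (w : String) (i : Int), Dom_parse_primary_py w i → Pre_parse_primary_py w i → Spec_parse_primary_py w i (parse_primary_py w i)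

-- ===== LEMMAS AND PROOFS =====

-- B's scan: findIdx of the stop test is the length of the stop-free prefix, and take of it is that prefix.
theorem findIdx_takeWhile_aux (l : List Char) :
    l.findIdx (fun c => c = ' ' || c = ')') =
      (l.takeWhile (fun c => !(c = ' ' || c = ')'))).length ∧
    l.take (l.findIdx (fun c => c = ' ' || c = ')')) =
      l.takeWhile (fun c => !(c = ' ' || c = ')')) := by
  induction l with
  | nil => simp
  | cons c t ih =>
    by_cases h : (c = ' ' || c = ')') = true
    · rw [List.findIdx_cons, List.takeWhile_cons, h]
      simp
    · rw [List.findIdx_cons, List.takeWhile_cons, Bool.eq_false_iff.mpr h]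
      simp only [Bool.not_false, cond_false, if_true]
      refine ⟨by simp [ih.1], ?_⟩
      simp only [List.take_succ_cons, ih.2]

-- A's loop, started at a nonnegative index n, appends exactly the stop-free prefix of (drop n cs)
-- and leaves i at n plus its length.
theorem parse_primary_py_go_eq (cs : List Char) (n : Nat) (o : List Char) :
    parse_primary_py_go cs o (n : Int) =
      (o ++ (cs.drop n).takeWhile (fun c => !(c = ' ' || c = ')')),
        (n : Int) + ((cs.drop n).takeWhile (fun c => !(c = ' ' || c = ')'))).length) := by
  have key : ∀ (m n : Nat) (o : List Char), cs.length - n = m →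
      parse_primary_py_go cs o (n : Int) =
        (o ++ (cs.drop n).takeWhile (fun c => !(c = ' ' || c = ')')),
          (n : Int) + ((cs.drop n).takeWhile (fun c => !(c = ' ' || c = ')'))).length) := by
    intro m
    induction m with
    | zero =>
      intro n o hm
      have hge : cs.length ≤ n := by omega
      rw [parse_primary_py_go]
      split
      · simp [List.drop_eq_nil_of_le hge]
      · rename_i c heq
        simp [PySem.List.pyGet?_natCast, List.getElem?_eq_none hge] at heq
    | succ m ih =>
      intro n o hm
      have hlt : n < cs.length := by omega
      have hdrop : cs.drop n = cs[n] :: cs.drop (n + 1) := List.drop_eq_getElem_cons hlt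
      have hcast : ((n : Int) + 1) = (((n + 1 : Nat)) : Int) := by push_cast; ring
      rw [parse_primary_py_go]
      split
      · rename_i heq
        simp [PySem.List.pyGet?_natCast, List.getElem?_eq_getElem hlt] at heq
      · rename_i c heq
        simp only [PySem.List.pyGet?_natCast, List.getElem?_eq_getElem hlt, Option.some.injEq] at heq
        subst heq
        rw [hdrop, List.takeWhile_cons]
        by_cases h : cs[n] = ' ' ∨ cs[n] = ')'
        · have hb : (!(cs[n] = ' ' || cs[n] = ')')) = false := by simp; tauto
          rw [hb]
          simp [h]
        · have hb : (!(cs[n] = ' ' || cs[n] = ')')) = true := by simp; tauto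
          rw [hb]
          simp only [if_true, h, if_false]
          rw [hcast, ih (n + 1) (o ++ [cs[n]]) (by omega)]
          simp
          ring
  exact key (cs.length - n) n o rfl

-- ===== VERDICT (by name: the statement is the Claim_ definition above) =====
theorem parse_primary_py_spec : Claim_equal_parse_primary_py := by
  intro w i _ hpre
  obtain ⟨h0, _, _, _⟩ := hpre
  unfold Spec_parse_primary_py parse_primary_py parse_primary_py_alt
  have hi : i = ((i.toNat : Nat) : Int) := by omega
  rw [hi, PySem.List.slice_from_natCast, parse_primary_py_go_eq]
  obtain ⟨hk, ht⟩ := findIdx_takeWhile_aux (w.toList.drop i.toNat)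
  dsimp only
  rw [ht, hk, List.nil_append]
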